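-- pv_equiv track=rewrite | github.com/Nickydoesthings/slipwords | scripts/parse_cedict.py | detect_variant
-- ===== SOURCE A (Python) =====
-- def detect_variant(definitions: str) -> bool:
--     """Return True if any definition marks this as a variant."""
--     parts = [d.strip().lower() for d in definitions.split("/") if d.strip()]
--     for d in parts:
--         if (
--             d.startswith("variant of")
--             or d.startswith("old variant of")
--             or d.startswith("archaic form of")
--             or d.startswith("archaic variant of")
--         ):
--             return True
--     return False
-- ===== SOURCE B (Python) =====
-- _VARIANT_PREFIXES = ("variant of", "old variant of", "archaic form of", "archaic variant of")
--
--
-- def detect_variant(definitions: str) -> bool: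
--     """Return True if any definition marks this as a variant.
--
--     Single left-to-right pass: lowercase once, then at each segment start
--     (beginning of string or just after a '/') skip leading whitespace and
--     test the four prefixes in place; no intermediate list of stripped
--     segments is built.
--     """
--     s = definitions.lower()
--     i = 0
--     while True:
--         j = i
--         while j < len(s) and s[j].isspace():
--             j += 1
--         if s.startswith(_VARIANT_PREFIXES, j):
--             return True
--         slash = s.find("/", i)
--         if slash < 0:
--             return False
--         i = slash + 1
-- ===== Notes on version B (the rewrite author's own statement) =====
-- stated objective: alternative
-- what changed: Replaces split/strip/lower-per-segment list building with a single pass over the once-lowercased string that tests the four prefixes in place at each segment start (after skipping leading whitespace) and jumps to the next separator.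
import Mathlib
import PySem

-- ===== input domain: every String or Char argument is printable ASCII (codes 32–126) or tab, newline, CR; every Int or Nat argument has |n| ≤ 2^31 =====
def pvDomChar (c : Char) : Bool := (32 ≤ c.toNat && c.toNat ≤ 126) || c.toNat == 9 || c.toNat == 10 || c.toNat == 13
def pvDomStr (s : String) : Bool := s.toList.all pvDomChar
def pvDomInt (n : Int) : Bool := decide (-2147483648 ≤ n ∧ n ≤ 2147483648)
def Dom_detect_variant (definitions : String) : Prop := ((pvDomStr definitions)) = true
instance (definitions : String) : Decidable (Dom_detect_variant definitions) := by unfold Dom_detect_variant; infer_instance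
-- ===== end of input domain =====

-- B replaces A's split/strip/lower-per-segment list building by a single in-place scan of the
-- once-lowercased string; same return value, proven equal (objective: alternative).

-- ===== PORT A =====
-- the explicit 'for d in parts: if d.startswith(...)' loop of A
def dvLoopA : List (List Char) → Bool
  | [] => false
  | d :: rest =>
    if PySem.Chars.startswith d ("variant of".toList)
        || PySem.Chars.startswith d ("old variant of".toList)
        || PySem.Chars.startswith d ("archaic form of".toList)
        || PySem.Chars.startswith d ("archaic variant of".toList) then true
    else dvLoopA rest

def detect_variant (definitions : String) : Bool :=
  let parts := ((PySem.Chars.splitOn definitions.toList ['/']).filter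
      (fun d => !(PySem.Chars.strip d).isEmpty)).map
      (fun d => PySem.Chars.lower (PySem.Chars.strip d))
  dvLoopA parts

-- ===== PORT B =====
-- s.startswith(_VARIANT_PREFIXES, j) where j is i with leading whitespace skipped
def dvHit (l : List Char) : Bool :=
  let j := l.dropWhile PySem.Chars.isspace
  PySem.Chars.startswith j ("variant of".toList)
    || PySem.Chars.startswith j ("old variant of".toList)
    || PySem.Chars.startswith j ("archaic form of".toList)
    || PySem.Chars.startswith j ("archaic variant of".toList)

-- s.find("/", i) and advance past it: the rest of the string after the first '/'
def dvAfterSlash : List Char → Option (List Char)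
  | [] => none
  | c :: r => if c = '/' then some r else dvAfterSlash r

-- termination fact for dvScan (cited by decreasing_by below)
lemma dvAfterSlash_length : ∀ (l r : List Char), dvAfterSlash l = some r → r.length < l.length := by
  intro l
  induction l with
  | nil => intro r hr; simp [dvAfterSlash] at hr
  | cons c t ih =>
    intro r h
    by_cases hc : c = '/'
    · simp [dvAfterSlash, hc] at h; simp [← h]
    · simp only [dvAfterSlash, hc, if_false] at h
      exact Nat.lt_trans (ih r h) (Nat.lt_succ_self _)

-- the 'while True' loop of B over the lowered string
def dvScan (l : List Char) : Bool :=
  if dvHit l then true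
  else
    match h : dvAfterSlash l with
    | none => false
    | some r => dvScan r
termination_by l.length
decreasing_by exact dvAfterSlash_length _ _ h

def detect_variant_alt (definitions : String) : Bool :=
  dvScan (PySem.Chars.lower definitions.toList)

-- ===== PRECONDITION & SPEC =====
def Spec_detect_variant (definitions : String) (out : Bool) : Prop := out = detect_variant_alt definitions
instance (definitions : String) (out : Bool) : Decidable (Spec_detect_variant definitions out) := by unfold Spec_detect_variant; infer_instance

-- ===== CLAIM (what is proved, stated in full; the proofs are below) =====
def Claim_equal_detect_variant : Prop := ∀ (definitions : String), Dom_detect_variant definitions → Spec_detect_variant definitions (detect_variant definitions)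

-- ===== LEMMAS AND PROOFS =====

-- proof-side canonical split on '/'
def segs : List Char → List (List Char)
  | [] => [[]]
  | c :: r => if c = '/' then [] :: segs r else (segs r).modifyHead (c :: ·)

def preFirst (pre : List Char) : List (List Char) → List (List Char)
  | [] => [pre]
  | h :: t => (pre ++ h) :: t

lemma segs_ne_nil (l : List Char) : segs l ≠ [] := by
  induction l with
  | nil => simp [segs]
  | cons c r ih =>
    by_cases hc : c = '/' <;> simp [segs, hc]
    cases hs : segs r with
    | nil => exact absurd hs ih
    | cons a t => simp

lemma preFirst_nil_of_ne (ls : List (List Char)) (h : ls ≠ []) : preFirst [] ls = ls := by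
  cases ls with
  | nil => exact absurd rfl h
  | cons a t => simp [preFirst]

lemma go_eq : ∀ (fuel : Nat) (l cur : List Char) (acc : List (List Char)),
    l.length < fuel →
    PySem.Chars.splitOn.go ['/'] fuel l cur acc = acc.reverse ++ preFirst cur.reverse (segs l) := by
  intro fuel
  induction fuel with
  | zero => intro l cur acc h; omega
  | succ f ih =>
    intro l cur acc h
    cases l with
    | nil =>
      simp [PySem.Chars.splitOn.go, segs, preFirst]
    | cons c rest =>
      by_cases hc : c = '/'
      · subst hc
        have hpre : List.isPrefixOf ['/'] ('/' :: rest) = true := by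
          simp [List.isPrefixOf]
        rw [PySem.Chars.splitOn.go]
        simp only [hpre, if_true]
        have hd : List.drop (['/'] : List Char).length ('/' :: rest) = rest := rfl
        rw [hd]
        rw [ih rest [] (cur.reverse :: acc) (by simp at h ⊢; omega)]
        rw [List.reverse_nil, preFirst_nil_of_ne _ (segs_ne_nil rest)]
        simp [segs, preFirst]
      · have hpre : List.isPrefixOf ['/'] (c :: rest) = false := by
          simp [List.isPrefixOf]
          intro hc'; exact absurd hc'.symm hc
        rw [PySem.Chars.splitOn.go]
        simp only [hpre, Bool.false_eq_true, if_false]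
        rw [ih rest (c :: cur) acc (by simp at h ⊢; omega)]
        simp only [segs, hc, if_false]
        cases hs : segs rest with
        | nil => exact absurd hs (segs_ne_nil rest)
        | cons hd tl => simp [preFirst, List.modifyHead]

lemma splitOn_eq_segs (l : List Char) : PySem.Chars.splitOn l ['/'] = segs l := by
  unfold PySem.Chars.splitOn
  rw [go_eq (l.length + 1) l [] [] (Nat.lt_succ_self _)]
  simp [preFirst_nil_of_ne _ (segs_ne_nil l)]

-- B's per-start test with the four concrete prefixes
def startsAny (l : List Char) : Bool :=
  PySem.Chars.startswith l ("variant of".toList)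
    || PySem.Chars.startswith l ("old variant of".toList)
    || PySem.Chars.startswith l ("archaic form of".toList)
    || PySem.Chars.startswith l ("archaic variant of".toList)

lemma dvHit_eq (l : List Char) : dvHit l = startsAny (l.dropWhile PySem.Chars.isspace) := rfl

lemma startsAny_nil : startsAny [] = false := by decide

lemma startsAny_slash_cons (x : List Char) : startsAny ('/' :: x) = false := by
  simp [startsAny, PySem.Chars.startswith, List.isPrefixOf]

lemma dvAfterSlash_structure : ∀ (l : List Char),
    ('/' ∉ l ∧ dvAfterSlash l = none ∧ segs l = [l]) ∨
    (∃ h rest, l = h ++ '/' :: rest ∧ '/' ∉ h ∧ dvAfterSlash l = some rest ∧ segs l = h :: segs rest) := by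
  intro l
  induction l with
  | nil => left; simp [dvAfterSlash, segs]
  | cons c r ih =>
    by_cases hc : c = '/'
    · subst hc
      right
      exact ⟨[], r, by simp, by simp, by simp [dvAfterSlash], by simp [segs]⟩
    · have hc' : ¬ ('/' = c) := fun h => hc h.symm
      rcases ih with ⟨hni, hna, hs⟩ | ⟨h, rest, heq, hnh, hna, hs⟩
      · left
        refine ⟨by simp [hc', hni], by simp [dvAfterSlash, hc, hna], ?_⟩
        simp [segs, hc, hs, List.modifyHead]
      · right
        refine ⟨c :: h, rest, by simp [heq], by simp [hc', hnh], by simp [dvAfterSlash, hc, hna], ?_⟩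
        simp [segs, hc, hs, List.modifyHead]

lemma prefix_append_slash_iff (p x y : List Char) (hp : '/' ∉ p) :
    p <+: (x ++ '/' :: y) ↔ p <+: x := by
  constructor
  · intro hpre
    by_cases hle : p.length ≤ x.length
    · exact List.prefix_of_prefix_length_le hpre (List.prefix_append x _) hle
    · have hxp : x <+: p :=
        List.prefix_of_prefix_length_le (List.prefix_append x _) hpre (by omega)
      obtain ⟨d, hd⟩ := hxp
      obtain ⟨e, he⟩ := hpre
      rw [← hd] at he
      have hde : d ++ e = '/' :: y := by
        apply List.append_cancel_left (as := x); rw [← List.append_assoc]; exact he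
      cases d with
      | nil =>
        simp only [List.append_nil] at hd
        rw [← hd] at hle; simp at hle
      | cons a t =>
        simp only [List.cons_append, List.cons.injEq] at hde
        exact absurd (by rw [← hd, hde.1]; simp) hp
  · intro hpre
    exact hpre.trans (List.prefix_append x _)

lemma isPrefixOf_append_slash (p x y : List Char) (hp : '/' ∉ p) :
    p.isPrefixOf (x ++ '/' :: y) = p.isPrefixOf x := by
  have h := prefix_append_slash_iff p x y hp
  rw [← List.isPrefixOf_iff_prefix, ← List.isPrefixOf_iff_prefix] at h
  exact Bool.eq_iff_iff.mpr h

lemma startsAny_append_slash (x y : List Char) :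
    startsAny (x ++ '/' :: y) = startsAny x := by
  simp only [startsAny, PySem.Chars.startswith,
    isPrefixOf_append_slash ("variant of".toList) x y (by decide),
    isPrefixOf_append_slash ("old variant of".toList) x y (by decide),
    isPrefixOf_append_slash ("archaic form of".toList) x y (by decide),
    isPrefixOf_append_slash ("archaic variant of".toList) x y (by decide)]

lemma dvHit_append_slash (h rest : List Char) :
    dvHit (h ++ '/' :: rest) = dvHit h := by
  rw [dvHit_eq, dvHit_eq]
  rw [List.dropWhile_append]
  by_cases hall : (h.dropWhile PySem.Chars.isspace).isEmpty
  · simp only [hall, if_true]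
    rw [List.isEmpty_iff] at hall
    rw [hall, startsAny_nil]
    rw [List.dropWhile_cons_of_neg (by decide)]
    exact startsAny_slash_cons rest
  · simp only [hall, Bool.false_eq_true, if_false]
    exact startsAny_append_slash _ _

lemma dvScan_none (l : List Char) (h : dvAfterSlash l = none) : dvScan l = dvHit l := by
  rw [dvScan]
  by_cases hh : dvHit l
  · simp [hh]
  · simp only [hh, Bool.false_eq_true, if_false]
    split
    · rfl
    · rename_i r heq; rw [h] at heq; cases heq

lemma dvScan_some (l r : List Char) (h : dvAfterSlash l = some r) :
    dvScan l = (dvHit l || dvScan r) := by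
  rw [dvScan]
  by_cases hh : dvHit l
  · simp [hh]
  · simp only [hh, Bool.false_eq_true, if_false, Bool.false_or]
    split
    · rename_i heq; rw [h] at heq; cases heq
    · rename_i r' heq; rw [h] at heq; cases heq; rfl

lemma dvScan_eq_any (l : List Char) : dvScan l = (segs l).any dvHit := by
  rcases dvAfterSlash_structure l with ⟨_, hna, hs⟩ | ⟨h, rest, heq, _, hna, hs⟩
  · rw [dvScan_none l hna, hs]; simp
  · have hlen : rest.length < l.length := dvAfterSlash_length l rest hna
    rw [dvScan_some l rest hna, hs, dvScan_eq_any rest]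
    rw [heq, dvHit_append_slash]
    simp
termination_by l.length

-- A's loop equals any of the same test
lemma dvLoopA_eq_any (ps : List (List Char)) : dvLoopA ps = ps.any startsAny := by
  induction ps with
  | nil => simp [dvLoopA]
  | cons d rest ih =>
    rw [dvLoopA]
    show (if startsAny d then true else dvLoopA rest) = _
    by_cases hd : startsAny d <;> simp [hd, ih]

-- character-level facts about lowerChar / isspace
lemma upper_toNat (c : Char) (h : PySem.Chars.isupper c = true) : 65 ≤ c.toNat ∧ c.toNat ≤ 90 := by
  unfold PySem.Chars.isupper at h
  simp only [Bool.and_eq_true, decide_eq_true_eq, Char.le_def, UInt32.le_iff_toNat_le] at h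
  exact h

lemma lowerChar_toNat (c : Char) (h : PySem.Chars.isupper c = true) :
    (PySem.Chars.lowerChar c).toNat = c.toNat + 32 := by
  have hb := upper_toNat c h
  unfold PySem.Chars.lowerChar
  rw [if_pos h, Char.toNat_ofNat, if_pos]
  left; omega

lemma isspace_of_toNat_lower (c : Char) (h : 97 ≤ c.toNat ∧ c.toNat ≤ 122) :
    PySem.Chars.isspace c = false := by
  unfold PySem.Chars.isspace
  simp only [Bool.or_eq_false_iff, Bool.and_eq_false_iff, decide_eq_false_iff_not]
  omega

lemma isspace_lowerChar (c : Char) :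
    PySem.Chars.isspace (PySem.Chars.lowerChar c) = PySem.Chars.isspace c := by
  by_cases h : PySem.Chars.isupper c = true
  · have hb := upper_toNat c h
    have h1 : PySem.Chars.isspace (PySem.Chars.lowerChar c) = false := by
      apply isspace_of_toNat_lower
      rw [lowerChar_toNat c h]; omega
    have h2 : PySem.Chars.isspace c = false := by
      unfold PySem.Chars.isspace
      simp only [Bool.or_eq_false_iff, Bool.and_eq_false_iff, decide_eq_false_iff_not]
      omega
    rw [h1, h2]
  · unfold PySem.Chars.lowerChar
    rw [if_neg h]

lemma lowerChar_ne_slash (c : Char) (hc : c ≠ '/') : PySem.Chars.lowerChar c ≠ '/' := by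
  by_cases h : PySem.Chars.isupper c = true
  · intro heq
    have := lowerChar_toNat c h
    rw [heq] at this
    have hb := upper_toNat c h
    have h47 : ('/' : Char).toNat = 47 := rfl
    rw [h47] at this
    omega
  · unfold PySem.Chars.lowerChar
    rw [if_neg h]
    exact hc

-- lower / segs commute
lemma segs_lower (l : List Char) :
    segs (l.map PySem.Chars.lowerChar) = (segs l).map (List.map PySem.Chars.lowerChar) := by
  induction l with
  | nil => simp [segs]
  | cons c r ih =>
    by_cases hc : c = '/'
    · subst hc
      have hl : PySem.Chars.lowerChar '/' = '/' := by decide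
      simp [segs, hl, ih]
    · have hlc : PySem.Chars.lowerChar c ≠ '/' := lowerChar_ne_slash c hc
      simp only [List.map_cons, segs, hc, if_false, hlc, ih]
      cases hs : segs r with
      | nil => exact absurd hs (segs_ne_nil r)
      | cons a t => simp [List.modifyHead]

-- lower commutes with lstrip / rstrip / strip
lemma lower_lstrip (x : List Char) :
    PySem.Chars.lstrip (x.map PySem.Chars.lowerChar) = (PySem.Chars.lstrip x).map PySem.Chars.lowerChar := by
  unfold PySem.Chars.lstrip
  rw [List.dropWhile_map,
    show (PySem.Chars.isspace ∘ PySem.Chars.lowerChar) = PySem.Chars.isspace from funext isspace_lowerChar]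

lemma lower_rstrip (x : List Char) :
    PySem.Chars.rstrip (x.map PySem.Chars.lowerChar) = (PySem.Chars.rstrip x).map PySem.Chars.lowerChar := by
  unfold PySem.Chars.rstrip
  rw [← List.map_reverse, List.dropWhile_map,
    show (PySem.Chars.isspace ∘ PySem.Chars.lowerChar) = PySem.Chars.isspace from funext isspace_lowerChar,
    ← List.map_reverse]

lemma lower_strip (x : List Char) :
    (PySem.Chars.strip x).map PySem.Chars.lowerChar = PySem.Chars.strip (x.map PySem.Chars.lowerChar) := by
  unfold PySem.Chars.strip
  rw [← lower_rstrip, ← lower_lstrip]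

-- prefixes ending in a non-space char see through rstrip
lemma prefix_rstrip (p y : List Char) (hne : p ≠ [])
    (hlast : PySem.Chars.isspace (p.getLast hne) = false) :
    p <+: PySem.Chars.rstrip y ↔ p <+: y := by
  constructor
  · intro h
    refine h.trans ?_
    unfold PySem.Chars.rstrip
    calc (List.dropWhile PySem.Chars.isspace y.reverse).reverse
        <+: y.reverse.reverse := List.reverse_prefix.mpr (List.dropWhile_suffix _)
      _ = y := List.reverse_reverse y
  · intro h
    obtain ⟨t, ht⟩ := h
    have hprev : p.reverse = p.getLast hne :: p.dropLast.reverse := by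
      conv_lhs => rw [← List.dropLast_append_getLast hne]
      simp
    have hdropp : List.dropWhile PySem.Chars.isspace p.reverse = p.reverse := by
      rw [hprev, List.dropWhile_cons_of_neg (by simp [hlast])]
    subst ht
    unfold PySem.Chars.rstrip
    rw [List.reverse_append, List.dropWhile_append]
    by_cases he : (List.dropWhile PySem.Chars.isspace t.reverse).isEmpty
    · simp only [he, if_true, hdropp]
      simp
    · simp only [he, Bool.false_eq_true, if_false]
      rw [List.reverse_append]
      simp

lemma startsAny_rstrip (y : List Char) : startsAny (PySem.Chars.rstrip y) = startsAny y := by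
  unfold startsAny PySem.Chars.startswith
  have hrw : ∀ p : List Char, (hne : p ≠ []) → PySem.Chars.isspace (p.getLast hne) = false →
      p.isPrefixOf (PySem.Chars.rstrip y) = p.isPrefixOf y := by
    intro p hne hlast
    have h := prefix_rstrip p y hne hlast
    rw [← List.isPrefixOf_iff_prefix, ← List.isPrefixOf_iff_prefix] at h
    exact Bool.eq_iff_iff.mpr h
  rw [hrw ("variant of".toList) (by decide) (by decide),
    hrw ("old variant of".toList) (by decide) (by decide),
    hrw ("archaic form of".toList) (by decide) (by decide),
    hrw ("archaic variant of".toList) (by decide) (by decide)]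

lemma head_dropWhile_false {p : Char → Bool} {l : List Char} {c : Char} {r : List Char}
    (h : l.dropWhile p = c :: r) : p c = false := by
  induction l with
  | nil => simp at h
  | cons a t ih =>
    by_cases ha : p a
    · rw [List.dropWhile_cons_of_pos ha] at h; exact ih h
    · rw [List.dropWhile_cons_of_neg ha] at h
      cases h; simpa using ha

lemma rstrip_lstrip_empty (x : List Char)
    (h : (PySem.Chars.rstrip (PySem.Chars.lstrip x)).isEmpty = true) :
    PySem.Chars.lstrip x = [] := by
  unfold PySem.Chars.rstrip at h
  rw [List.isEmpty_iff] at h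
  have hall : ∀ a ∈ (PySem.Chars.lstrip x).reverse, PySem.Chars.isspace a = true := by
    rw [← List.dropWhile_eq_nil_iff]
    simpa using h
  cases hy : PySem.Chars.lstrip x with
  | nil => rfl
  | cons c r =>
    have hc : PySem.Chars.isspace c = false := head_dropWhile_false (p := PySem.Chars.isspace) hy
    have : PySem.Chars.isspace c = true := hall c (by simp [hy])
    rw [hc] at this; cases this

-- per-segment: A's stripped-lowered test = B's in-place test on the lowered segment
lemma per_segment (d : List Char) :
    ((!(PySem.Chars.strip d).isEmpty) && startsAny (PySem.Chars.lower (PySem.Chars.strip d)))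
      = dvHit (PySem.Chars.lower d) := by
  rw [dvHit_eq]
  unfold PySem.Chars.lower
  rw [lower_strip]
  have hiso : (PySem.Chars.strip d).isEmpty = (PySem.Chars.strip (d.map PySem.Chars.lowerChar)).isEmpty := by
    unfold PySem.Chars.strip
    rw [lower_lstrip, lower_rstrip]
    simp
  rw [hiso]
  set x := d.map PySem.Chars.lowerChar with hx
  have hlst : x.dropWhile PySem.Chars.isspace = PySem.Chars.lstrip x := rfl
  rw [hlst]
  unfold PySem.Chars.strip
  rw [startsAny_rstrip]
  by_cases he : (PySem.Chars.rstrip (PySem.Chars.lstrip x)).isEmpty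
  · have hnil : PySem.Chars.lstrip x = [] := rstrip_lstrip_empty x he
    rw [hnil]
    simp [startsAny_nil]
  · simp [he]

-- ===== VERDICT (by name: the statement is the Claim_ definition above) =====
theorem detect_variant_spec : Claim_equal_detect_variant := by
  intro definitions _
  unfold Spec_detect_variant detect_variant detect_variant_alt
  rw [splitOn_eq_segs, dvLoopA_eq_any, dvScan_eq_any]
  unfold PySem.Chars.lower
  rw [segs_lower, List.any_map, List.any_map, List.any_filter]
  congr 1
  funext d
  have := per_segment d
  unfold PySem.Chars.lower at this
  simpa [Function.comp] using this
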